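-- pv_equiv track=rewrite | github.com/Choto02/kyber_py | ml_kem_modules.py | ByteDecode
-- ===== SOURCE A (Python) =====
-- KYBER_Q = 3329  # Modulus
--
-- def BytesToBits(B):
--     """
--     Converts a byte array (list of integers) into a bit array.
--     """
--     # Initialize an empty bit array
--     b = []
--
--     # Iterate over each byte in the input array
--     for i in range(len(B)):
--         C_i = B[i]  # Copy the current byte
--         for j in range(8):
--             b.append(C_i % 2)
--             C_i //= 2
--
--     return b
--
-- def ByteDecode(B,d):
--     """
--     Decodes a byte array into an array of d-bit integers.
--     d is the subscript of ByteDecode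
--     """
--     # Step 1: Convert byte array B into a bit array b
--     b = BytesToBits(B)
--
--     # Step 2: Determine modulus m based on d
--     m = (2 ** d) if d < 12 else KYBER_Q
--
--     # Step 3: Initialize the integer array F
--     F = [0] * 256
--
--     # Step 4: Decode each integer from the bit array
--     for i in range(256):
--         for j in range(d):
--             F[i] += b[i * d + j] * (2 ** j)  # Calculate the contribution of each bit
--         F[i] %= m  # Apply modulus m
--
--     return F
-- ===== SOURCE B (Python) =====
-- KYBER_Q = 3329  # Modulus
--
-- def ByteDecode(B, d):
--     """
--     Decodes a byte array into an array of d-bit integers, by slicing one big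
--     little-endian integer instead of building a per-bit list.
--     """
--     if 8 * len(B) < 256 * d:
--         raise IndexError("byte array too short for 256 d-bit integers")
--     N = 0
--     for i, byte in enumerate(B):
--         N += (byte % 256) << (8 * i)
--     mask = (1 << d) - 1
--     m = (1 << d) if d < 12 else KYBER_Q
--     return [((N >> (i * d)) & mask) % m for i in range(256)]
-- ===== Notes on version B (the rewrite author's own statement) =====
-- stated objective: idiomatic
-- what changed: Replaces the per-bit list (BytesToBits) and per-bit accumulation loop with one big little-endian integer built from the bytes, from which each d-bit value is extracted by a single shift-and-mask.
import Mathlib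
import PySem

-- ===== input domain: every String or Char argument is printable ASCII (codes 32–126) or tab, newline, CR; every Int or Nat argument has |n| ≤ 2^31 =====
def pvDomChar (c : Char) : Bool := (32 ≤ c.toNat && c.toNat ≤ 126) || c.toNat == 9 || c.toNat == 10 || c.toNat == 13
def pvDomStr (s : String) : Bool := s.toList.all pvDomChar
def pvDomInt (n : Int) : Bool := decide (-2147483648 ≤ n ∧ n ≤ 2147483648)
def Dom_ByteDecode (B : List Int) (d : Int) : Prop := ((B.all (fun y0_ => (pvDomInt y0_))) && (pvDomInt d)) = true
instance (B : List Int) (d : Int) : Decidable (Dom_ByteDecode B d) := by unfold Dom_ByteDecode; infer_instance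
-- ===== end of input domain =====

-- B replaces A's per-bit list and per-bit accumulation with one big little-endian
-- integer sliced by shift-and-mask (objective: idiomatic; same asymptotic cost).


-- ===== PORT A =====
-- inner loop of BytesToBits: 8 iterations of 'b.append(C_i % 2); C_i //= 2'
def bitsOfByte : Int → Nat → List Int
  | _, 0 => []
  | c, n + 1 => PySem.Int.mod c 2 :: bitsOfByte (PySem.Int.floordiv c 2) n

def BytesToBits (B : List Int) : List Int :=
  B.foldl (fun acc c => acc ++ bitsOfByte c 8) []

-- Under Pre_ (0 ≤ d, bit list long enough) 'b[i*d+j]' is in range, so getD is exact,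
-- and '2 ** d' is 2 ^ d.toNat.
def ByteDecode (B : List Int) (d : Int) : List Int :=
  let b := BytesToBits B
  let m : Int := if d < 12 then 2 ^ d.toNat else 3329
  (List.range 256).map (fun i =>
    PySem.Int.mod
      ((List.range d.toNat).foldl
        (fun F j => F + b.getD (i * d.toNat + j) 0 * 2 ^ j) 0) m)

-- ===== PORT B =====
-- 'for i, byte in enumerate(B): N += (byte % 256) << (8*i)' — N is a nonnegative
-- running sum ('byte % 256' is a floor mod, nonnegative), tracked as a Nat.
def buildN : List Int → Nat → Nat → Nat
  | [], _, acc => acc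
  | c :: rest, i, acc => buildN rest (i + 1) (acc + (PySem.Int.mod c 256).toNat <<< (8 * i))

-- Under Pre_ (0 ≤ d) the shift counts '1 << d', 'N >> (i*d)' use d.toNat exactly;
-- B's 'raise IndexError' length guard fires only outside Pre_ (Pre_ excludes it).
def ByteDecode_alt (B : List Int) (d : Int) : List Int :=
  let N : Nat := buildN B 0 0
  let mask : Nat := (1 <<< d.toNat) - 1
  let m : Int := if d < 12 then ((1 <<< d.toNat : Nat) : Int) else 3329
  (List.range 256).map (fun i =>
    PySem.Int.mod (((N >>> (i * d.toNat)) &&& mask : Nat) : Int) m)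

-- ===== PRECONDITION & SPEC =====
-- Pre_ excludes d < 0 (A's '2 ** d' is a float, so A returns a list of floats, not
-- ints) and bit lists shorter than 256*d (A raises IndexError).
def Pre_ByteDecode (B : List Int) (d : Int) : Prop :=
  0 ≤ d ∧ 256 * d ≤ 8 * (B.length : Int)
instance (B : List Int) (d : Int) : Decidable (Pre_ByteDecode B d) := by
  unfold Pre_ByteDecode; infer_instance

def pvWitness_ByteDecode : List Int × Int := ([3, 255], 0)

def Spec_ByteDecode (B : List Int) (d : Int) (out : List Int) : Prop := out = ByteDecode_alt B d
instance (B : List Int) (d : Int) (out : List Int) : Decidable (Spec_ByteDecode B d out) := by unfold Spec_ByteDecode; infer_instance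

-- ===== CLAIM (what is proved, stated in full; the proofs are below) =====
def Claim_equal_ByteDecode : Prop := ∀ (B : List Int) (d : Int), Dom_ByteDecode B d → Pre_ByteDecode B d → Spec_ByteDecode B d (ByteDecode B d)

-- ===== LEMMAS AND PROOFS =====

-- the little-endian value, in Int, as a simple recursion
def intN : List Int → Int
  | [] => 0
  | c :: rest => c % 256 + 256 * intN rest

lemma intN_nonneg (B : List Int) : 0 ≤ intN B := by
  induction B with
  | nil => simp [intN]
  | cons c r ih =>
      have := Int.emod_nonneg c (by norm_num : (256:Int) ≠ 0)
      simp only [intN]; omega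

lemma buildN_eq (B : List Int) : ∀ (i acc : Nat),
    ((buildN B i acc : Nat) : Int) = (acc : Int) + 2 ^ (8 * i) * intN B := by
  induction B with
  | nil => intro i acc; simp [buildN, intN]
  | cons c r ih =>
      intro i acc
      rw [buildN, ih]
      have hmod : ((PySem.Int.mod c 256).toNat : Int) = c % 256 := by
        rw [PySem.Int.mod_eq_emod_of_pos (by norm_num)]
        exact Int.toNat_of_nonneg (Int.emod_nonneg c (by norm_num))
      push_cast [Nat.shiftLeft_eq, intN]
      rw [hmod]
      rw [pow_mul, pow_mul, pow_succ]
      ring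

-- key division step
lemma emod_two_mul_ediv_two (c P : Int) (hP : 0 < P) : (c % (2*P)) / 2 = (c / 2) % P := by
  have h2P : (2*P) ≠ 0 := by omega
  have hR0 : 0 ≤ c % (2*P) := Int.emod_nonneg c h2P
  have hRlt : c % (2*P) < 2*P := Int.emod_lt_of_pos c (by omega)
  have hc : c = c % (2*P) + 2 * (P * (c / (2*P))) := by
    linear_combination -Int.mul_ediv_add_emod c (2*P)
  have hdiv : c / 2 = (c % (2*P)) / 2 + P * (c / (2*P)) := by
    conv_lhs => rw [hc]
    rw [Int.add_mul_ediv_left _ _ (by norm_num : (2:Int) ≠ 0)]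
  rw [hdiv, Int.add_mul_emod_self_left]
  exact (Int.emod_eq_of_lt (by positivity) (by omega)).symm

lemma bitsOfByte_eq (n : Nat) : ∀ (c : Int),
    bitsOfByte c n = (List.range n).map (fun j => (c % 2^n) / 2^j % 2) := by
  induction n with
  | zero => intro c; simp [bitsOfByte]
  | succ n ih =>
      intro c
      rw [List.range_succ_eq_map]
      simp only [bitsOfByte, List.map_cons, List.map_map]
      rw [List.cons.injEq]
      refine ⟨?_, ?_⟩
      · -- head
        rw [PySem.Int.mod_eq_emod_of_pos (by norm_num)]
        simp only [pow_zero, Int.ediv_one]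
        exact (Int.emod_emod_of_dvd c ⟨2^n, by ring⟩).symm
      · -- tail
        rw [ih, PySem.Int.floordiv_eq_ediv_of_pos (by norm_num)]
        apply List.map_congr_left
        intro j hj
        simp only [Function.comp]
        have key := emod_two_mul_ediv_two c (2^n) (by positivity)
        have : c % 2 ^ (n+1) / 2 ^ (j+1) = (c / 2) % 2^n / 2^j := by
          rw [pow_succ', pow_succ']
          rw [← Int.ediv_ediv_of_nonneg (by norm_num : (0:Int) ≤ 2), key]
        rw [this]

lemma bytesToBits_flatMap (B : List Int) :
    BytesToBits B = B.flatMap (fun c => bitsOfByte c 8) := by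
  rw [BytesToBits, PySem.List.foldl_append_eq_flatMap]
  rfl

lemma bytesToBits_getD (B : List Int) : ∀ (k : Nat), k < 8 * B.length →
    (BytesToBits B).getD k 0 = intN B / 2^k % 2 := by
  rw [bytesToBits_flatMap]
  induction B with
  | nil => intro k hk; simp at hk
  | cons c r ih =>
      intro k hk
      rw [List.flatMap_cons, bitsOfByte_eq]
      have hlen : ((List.range 8).map (fun j => c % 2^8 / 2^j % 2)).length = 8 := by simp
      have ht0 : 0 ≤ c % 2^8 := Int.emod_nonneg c (by norm_num)
      have ht1 : c % 2^8 < 2^8 := Int.emod_lt_of_pos c (by norm_num)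
      by_cases h8 : k < 8
      · rw [List.getD_append _ _ _ _ (by omega)]
        simp only [List.getD_eq_getElem?_getD, List.getElem?_map, List.getElem?_range h8]
        simp only [Option.map_some, Option.getD_some]
        -- goal: c % 2^8 / 2^k % 2 = intN (c::r) / 2^k % 2
        have hpow : (2:Int) ^ (k + (8 - k)) = 256 := by
          have h : k + (8 - k) = 8 := by omega
          rw [h]; norm_num
        have hsplit : intN (c :: r) / 2^k = c % 2^8 / 2^k + 2^(8-k) * intN r := by
          have h : intN (c :: r) = c % 2^8 + 2^k * (2^(8-k) * intN r) := by
            simp only [intN]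
            rw [← mul_assoc, ← pow_add, hpow]
            norm_num
          rw [h, Int.add_mul_ediv_left _ _ (by positivity)]
        rw [hsplit]
        have h1 : 1 ≤ 8 - k := by omega
        have : (2:Int)^(8-k) * intN r = 2 * (2^(8-k-1) * intN r) := by
          rw [← mul_assoc, ← pow_succ']
          congr 2
          omega
        rw [this, Int.add_mul_emod_self_left]
      · simp only [List.getD_eq_getElem?_getD,
          List.getElem?_append_right (by omega : (List.map (fun j => c % 2^8 / 2^j % 2) (List.range 8)).length ≤ k), hlen]
        have hr := ih (k - 8) (by simp at hk ⊢; omega)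
        simp only [List.getD_eq_getElem?_getD] at hr
        rw [hr]
        congr 1
        -- intN r / 2^(k-8) = intN (c::r) / 2^k
        have : intN (c :: r) = c % 2^8 + 2^8 * intN r := by simp [intN]
        rw [this]
        have hk8 : (2:Int)^k = 2^8 * 2^(k-8) := by rw [← pow_add]; congr 1; omega
        rw [hk8, ← Int.ediv_ediv_of_nonneg (by positivity)]
        rw [Int.add_mul_ediv_left _ _ (by positivity : (0:Int) < 2^8).ne']
        rw [Int.ediv_eq_zero_of_lt ht0 ht1]
        simp

lemma sum_bits (M : Int) (hM : 0 ≤ M) (dn : Nat) : ∀ (t : Nat),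
    (List.range dn).foldl (fun F j => F + M / 2^(t+j) % 2 * 2^j) (0:Int) = M / 2^t % 2^dn := by
  induction dn with
  | zero => intro t; simp
  | succ dn ih =>
      intro t
      rw [List.range_succ, List.foldl_append, ih]
      simp only [List.foldl_cons, List.foldl_nil]
      set q := M / 2^t with hq
      have hq0 : 0 ≤ q := Int.ediv_nonneg hM (by positivity)
      have hsplit : M / 2^(t+dn) = q / 2^dn := by
        rw [pow_add, ← Int.ediv_ediv_of_nonneg (by positivity)]
      rw [hsplit]
      -- q % 2^dn + q/2^dn % 2 * 2^dn = q % 2^(dn+1)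
      have h1 : q = (q % 2^dn + q / 2^dn % 2 * 2^dn) + 2^(dn+1) * (q / 2^dn / 2) := by
        have e1 := Int.mul_ediv_add_emod q (2^dn)
        have e2 := Int.mul_ediv_add_emod (q / 2^dn) 2
        rw [pow_succ]
        linear_combination -e1 - 2^dn * e2
      have hb1 : 0 ≤ q % 2^dn := Int.emod_nonneg q (by positivity)
      have hb2 : q % 2^dn < 2^dn := Int.emod_lt_of_pos q (by positivity)
      have hb3 : 0 ≤ q / 2^dn % 2 := Int.emod_nonneg _ (by norm_num)
      have hb4 : q / 2^dn % 2 < 2 := Int.emod_lt_of_pos _ (by norm_num)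
      have hlt : q % 2^dn + q / 2^dn % 2 * 2^dn < 2^(dn+1) := by
        rw [pow_succ]; nlinarith
      have hfix : (q % 2^dn + q / 2^dn % 2 * 2^dn) % 2^(dn+1)
          = q % 2^dn + q / 2^dn % 2 * 2^dn :=
        Int.emod_eq_of_lt (by positivity) hlt
      calc q % 2^dn + q / 2^dn % 2 * 2^dn
          = (q % 2^dn + q / 2^dn % 2 * 2^dn) % 2^(dn+1) := hfix.symm
        _ = q % 2^(dn+1) := by
            conv_rhs => rw [h1]
            rw [Int.add_mul_emod_self_left]

theorem main (B : List Int) (d : Int) (h0 : 0 ≤ d) (h1 : 256 * d ≤ 8 * (B.length : Int)) :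
    ByteDecode B d = ByteDecode_alt B d := by
  unfold ByteDecode ByteDecode_alt
  have hN : ((buildN B 0 0 : Nat) : Int) = intN B := by
    rw [buildN_eq]; simp
  have hm : (if d < 12 then ((2:Int)) ^ d.toNat else 3329)
      = (if d < 12 then (((1 <<< d.toNat : Nat) : Nat) : Int) else 3329) := by
    rw [Nat.one_shiftLeft]; push_cast; rfl
  set dn := d.toNat with hdn
  have hlen : 256 * dn ≤ 8 * B.length := by omega
  simp only []
  rw [hm]
  apply List.map_congr_left
  intro i hi
  have hi' : i < 256 := List.mem_range.mp hi
  congr 1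
  -- sum = slice
  have hM0 : 0 ≤ intN B := intN_nonneg B
  have hstep : (List.range dn).foldl
      (fun F j => F + (BytesToBits B).getD (i * dn + j) 0 * 2 ^ j) (0:Int)
      = (List.range dn).foldl (fun F j => F + intN B / 2^(i*dn+j) % 2 * 2 ^ j) (0:Int) := by
    apply PySem.List.foldl_congr_mem
    intro F j hj
    have hjlt : j < dn := List.mem_range.mp hj
    rw [bytesToBits_getD B (i*dn+j) (by nlinarith)]
  rw [hstep, sum_bits _ hM0 dn (i*dn)]
  rw [Nat.one_shiftLeft, Nat.and_two_pow_sub_one_eq_mod, Nat.shiftRight_eq_div_pow]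
  push_cast [Int.natCast_div, hN]
  rfl

-- ===== VERDICT (by name: the statement is the Claim_ definition above) =====
theorem ByteDecode_spec : Claim_equal_ByteDecode := by
  intro B d _hDom hPre
  unfold Pre_ByteDecode at hPre
  unfold Spec_ByteDecode
  exact main B d hPre.1 hPre.2
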